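-- pv_equiv track=rewrite | github.com/LDWLab/TwinCons | bin/aln_SVM.py | trim_data_by_top_segments
-- ===== SOURCE A (Python) =====
-- def trim_data_by_top_segments(csv_list, number_top_segments):
--     '''Returns trimmed down list by number of longest segments'''
--     from heapq import nlargest
--     aln_id_to_data = dict()
--     for row in csv_list:
--         if row[0] not in aln_id_to_data.keys():
--             aln_id_to_data[row[0]] = list()
--         aln_id_to_data[row[0]].append((row[2], row[3], row[1], row[4]))
--     output_list = list()
--     for aln_id, data_items in aln_id_to_data.items():
--         for segment_data in nlargest(number_top_segments, data_items):
--             output_list.append([aln_id, segment_data[2], segment_data[0], segment_data[1], segment_data[3]])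
--     return output_list
-- ===== SOURCE B (Python) =====
-- def trim_data_by_top_segments(csv_list, number_top_segments):
--     '''Returns trimmed down list by number of longest segments'''
--     output_list = []
--     pending = csv_list
--     keep = max(number_top_segments, 0)
--     while pending:
--         gid = pending[0][0]
--         group = [row for row in pending if row[0] == gid]
--         pending = [row for row in pending if row[0] != gid]
--         for t in sorted(((r[2], r[3], r[1], r[4]) for r in group), reverse=True)[:keep]:
--             output_list.append([gid, t[2], t[0], t[1], t[3]])
--     return output_list
-- ===== Notes on version B (the rewrite author's own statement) =====
-- stated objective: alternative
-- what changed: Replaces dict-based grouping followed by per-group heapq.nlargest with a single while loop that repeatedly partitions the remaining rows on the leading row's id and emits that group's descending-sorted top-k slice, using no dict and no heap.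
import Mathlib
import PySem

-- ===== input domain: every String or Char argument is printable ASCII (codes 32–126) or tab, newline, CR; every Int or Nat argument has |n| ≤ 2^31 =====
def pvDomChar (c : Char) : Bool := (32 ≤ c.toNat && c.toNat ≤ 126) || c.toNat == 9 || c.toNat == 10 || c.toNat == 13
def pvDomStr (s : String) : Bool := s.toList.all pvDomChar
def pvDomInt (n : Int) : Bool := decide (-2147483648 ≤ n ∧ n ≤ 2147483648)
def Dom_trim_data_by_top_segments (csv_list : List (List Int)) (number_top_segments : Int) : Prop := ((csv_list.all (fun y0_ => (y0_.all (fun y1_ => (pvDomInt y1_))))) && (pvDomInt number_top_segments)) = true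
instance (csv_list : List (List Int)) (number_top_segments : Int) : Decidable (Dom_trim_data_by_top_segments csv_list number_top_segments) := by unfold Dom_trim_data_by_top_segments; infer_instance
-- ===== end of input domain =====

-- B replaces A's dict-grouping + per-group heapq.nlargest by a while loop that repeatedly
-- partitions the remaining rows on the leading row's id and emits that group's
-- descending-sorted top-k slice (objective: alternative decomposition, no dict/heap).
-- Python tuples of ints are modelled as 4-element List Int (same lexicographic comparison).

-- row[0]
def pvKey (r : List Int) : Int := PySem.List.pyGetD r 0 0
-- (row[2], row[3], row[1], row[4])
def pvTup (r : List Int) : List Int :=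
  [PySem.List.pyGetD r 2 0, PySem.List.pyGetD r 3 0,
   PySem.List.pyGetD r 1 0, PySem.List.pyGetD r 4 0]
-- [aln_id, segment_data[2], segment_data[0], segment_data[1], segment_data[3]]
def pvRow (g : Int) (t : List Int) : List Int :=
  [g, PySem.List.pyGetD t 2 0, PySem.List.pyGetD t 0 0,
   PySem.List.pyGetD t 1 0, PySem.List.pyGetD t 3 0]

-- ===== PORT A =====
-- heapq.nlargest(n, xs) is ported by its documented contract sorted(xs, reverse=True)[:n].
def trim_data_by_top_segments (csv_list : List (List Int)) (number_top_segments : Int) : List (List Int) :=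
  let aln_id_to_data : PySem.Dict Int (List (List Int)) :=
    csv_list.foldl (fun d row =>
      (if d.contains (pvKey row) then d else d.insert (pvKey row) []).modify (pvKey row) []
        (fun l => l ++ [pvTup row]))
      PySem.Dict.empty
  aln_id_to_data.items.foldl (fun out p =>
    ((PySem.List.sorted p.2 (fun t => t) true).take number_top_segments.toNat).foldl
      (fun out t => out ++ [pvRow p.1 t]) out) []

-- ===== PORT B =====
def trim_data_by_top_segments_alt (csv_list : List (List Int)) (number_top_segments : Int) : List (List Int) :=
  match csv_list with
  | [] => []
  | row :: rest =>
    let gid := pvKey row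
    let group := (row :: rest).filter (fun r => pvKey r == gid)
    let pending := (row :: rest).filter (fun r => !(pvKey r == gid))
    ((PySem.List.sorted (group.map pvTup) (fun t => t) true).take (max number_top_segments 0).toNat).map
      (fun t => pvRow gid t)
    ++ trim_data_by_top_segments_alt pending number_top_segments
termination_by csv_list.length
decreasing_by
  simp only [List.filter_cons, beq_self_eq_true, Bool.not_true, List.length_cons]
  exact Nat.lt_succ_of_le (List.length_filter_le _ _)

-- ===== PRECONDITION & SPEC =====
-- Pre_ excludes exactly the inputs on which Python A raises IndexError: a row shorter than 5.
def Pre_trim_data_by_top_segments (csv_list : List (List Int)) (number_top_segments : Int) : Prop :=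
  ∀ r ∈ csv_list, 5 ≤ r.length
instance (csv_list : List (List Int)) (number_top_segments : Int) : Decidable (Pre_trim_data_by_top_segments csv_list number_top_segments) := by unfold Pre_trim_data_by_top_segments; infer_instance
def pvWitness_trim_data_by_top_segments : List (List Int) × Int :=
  ([[1, 10, 3, 4, 7], [1, 11, 5, 2, 8], [2, 12, 3, 9, 0]], 1)
def Spec_trim_data_by_top_segments (csv_list : List (List Int)) (number_top_segments : Int) (out : List (List Int)) : Prop := out = trim_data_by_top_segments_alt csv_list number_top_segments
instance (csv_list : List (List Int)) (number_top_segments : Int) (out : List (List Int)) : Decidable (Spec_trim_data_by_top_segments csv_list number_top_segments out) := by unfold Spec_trim_data_by_top_segments; infer_instance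

-- ===== CLAIM (what is proved, stated in full; the proofs are below) =====
def Claim_equal_trim_data_by_top_segments : Prop := ∀ (csv_list : List (List Int)) (number_top_segments : Int), Dom_trim_data_by_top_segments csv_list number_top_segments → Pre_trim_data_by_top_segments csv_list number_top_segments → Spec_trim_data_by_top_segments csv_list number_top_segments (trim_data_by_top_segments csv_list number_top_segments)

-- ===== LEMMAS AND PROOFS =====

-- the common middle form: first-appearance ids, and per-id top-k emission
def pvGroups (csv : List (List Int)) : List Int := PySem.Set.ofList (csv.map pvKey)
def pvEmit (csv : List (List Int)) (k : Int) (g : Int) : List (List Int) :=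
  ((PySem.List.sorted ((csv.filter (fun r => pvKey r == g)).map pvTup) (fun t => t) true).take k.toNat).map (pvRow g)

lemma pv_insert_modify (d : PySem.Dict Int (List (List Int))) (k : Int)
    (f : List (List Int) → List (List Int)) (h : d.contains k = false) :
    (d.insert k []).modify k [] f = d.modify k [] f := by
  unfold PySem.Dict.modify
  rw [PySem.Dict.getD_insert_self, PySem.Dict.insert_insert_self,
    PySem.Dict.getD_of_not_contains (h := h)]

lemma pvA_step : (fun (d : PySem.Dict Int (List (List Int))) row =>
      (if d.contains (pvKey row) then d else d.insert (pvKey row) []).modify (pvKey row) []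
        (fun l => l ++ [pvTup row]))
    = (fun d row => d.modify (pvKey row) [] (fun l => l ++ [pvTup row])) := by
  funext d row
  by_cases h : d.contains (pvKey row)
  · simp [h]
  · simp only [h, if_neg, Bool.false_eq_true, not_false_iff]
    exact pv_insert_modify _ _ _ (by simpa using h)

lemma pvA_char (csv : List (List Int)) (k : Int) :
    trim_data_by_top_segments csv k = (pvGroups csv).flatMap (pvEmit csv k) := by
  unfold trim_data_by_top_segments
  rw [pvA_step]
  dsimp only
  have hfold : csv.foldl (fun (d : PySem.Dict Int (List (List Int))) row => d.modify (pvKey row) [] (fun l => l ++ [pvTup row])) PySem.Dict.empty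
      = (csv.map (fun r => (pvKey r, pvTup r))).foldl (fun d p => d.modify p.1 [] (fun l => l ++ [p.2])) PySem.Dict.empty := by
    rw [List.foldl_map]
  set D := csv.foldl (fun (d : PySem.Dict Int (List (List Int))) row => d.modify (pvKey row) [] (fun l => l ++ [pvTup row])) PySem.Dict.empty with hD
  have hnodup : D.keys.Nodup := by
    rw [hD]
    exact PySem.Dict.nodup_keys_foldl_modify_key csv pvKey [] (fun d row => (· ++ [pvTup row])) PySem.Dict.empty (by simp [PySem.Dict.empty])
  have hkeys : D.keys = pvGroups csv := by
    rw [hD, PySem.Dict.keys_foldl_modify_key]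
    rfl
  have hgetD : ∀ g, D.getD g [] = (csv.filter (fun r => pvKey r == g)).map pvTup := by
    intro g
    rw [hfold, PySem.Dict.getD_foldl_modify_append]
    simp [List.filter_map, List.map_map, Function.comp_def]
  have hitems : D.items = D.keys.map (fun g => (g, D.getD g [])) :=
    PySem.Dict.items_eq_map_keys D hnodup []
  rw [hitems, hkeys]
  have hstep : (fun (out : List (List Int)) (p : Int × List (List Int)) =>
      ((PySem.List.sorted p.2 (fun t => t) true).take k.toNat).foldl (fun out t => out ++ [pvRow p.1 t]) out)
      = (fun out p => out ++ ((PySem.List.sorted p.2 (fun t => t) true).take k.toNat).map (pvRow p.1)) := by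
    funext out p
    rw [PySem.List.foldl_append_singleton_eq_map]
  rw [hstep, PySem.List.foldl_append_eq_flatMap, List.flatMap_map]
  simp only [hgetD]
  rfl

lemma pv_update_cons (a : Int) (ys : List Int) :
    ∀ s : List Int, (∀ y ∈ ys, y ≠ a) → PySem.Set.update (a :: s) ys = a :: PySem.Set.update s ys := by
  induction ys with
  | nil => intro s _; rfl
  | cons y ys ih =>
    intro s h
    have hy : y ≠ a := h y (by simp)
    simp only [PySem.Set.update, List.foldl_cons]
    have hadd : PySem.Set.add (a :: s) y = a :: PySem.Set.add s y := by
      rw [PySem.Set.add_eq_ite, PySem.Set.add_eq_ite]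
      by_cases hm : y ∈ s
      · simp [hm]
      · simp [hm, hy]
    rw [hadd]
    exact ih (PySem.Set.add s y) (fun z hz => h z (by simp [hz]))

lemma pv_update_filter (a : Int) (ys : List Int) :
    ∀ s : List Int, a ∈ s → PySem.Set.update s (ys.filter (fun x => !(x == a))) = PySem.Set.update s ys := by
  induction ys with
  | nil => intro s _; rfl
  | cons y ys ih =>
    intro s hs
    by_cases hy : y = a
    · subst hy
      simp only [List.filter_cons, beq_self_eq_true, Bool.not_true, if_neg, Bool.false_eq_true,
        not_false_iff, PySem.Set.update, List.foldl_cons]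
      rw [PySem.Set.add_of_mem hs]
      exact ih s hs
    · have : (!(y == a)) = true := by simp [hy]
      simp only [List.filter_cons, this, if_true, PySem.Set.update, List.foldl_cons]
      exact ih (PySem.Set.add s y) (by rw [PySem.Set.mem_add]; exact Or.inl hs)

lemma pv_ofList_cons (a : Int) (xs : List Int) :
    PySem.Set.ofList (a :: xs) = a :: PySem.Set.ofList (xs.filter (fun x => !(x == a))) := by
  have h1 : PySem.Set.ofList (a :: xs) = PySem.Set.update [a] xs := rfl
  rw [h1, ← pv_update_filter a xs [a] (by simp),
    pv_update_cons a (xs.filter (fun x => !(x == a))) [] (by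
      intro y hy
      have := List.of_mem_filter hy
      simpa using this)]
  rfl

lemma pvEmit_filter (csv : List (List Int)) (k gid g : Int) (hg : g ≠ gid) :
    pvEmit (csv.filter (fun r => !(pvKey r == gid))) k g = pvEmit csv k g := by
  unfold pvEmit
  rw [List.filter_filter]
  have h2 : List.filter (fun a => pvKey a == g && !(pvKey a == gid)) csv
      = List.filter (fun r => pvKey r == g) csv := by
    apply List.filter_congr
    intro x _
    by_cases hx : pvKey x = g
    · simp [hx, hg]
    · simp [hx]
  rw [h2]

lemma pvB_char (csv : List (List Int)) (k : Int) :
    trim_data_by_top_segments_alt csv k = (pvGroups csv).flatMap (pvEmit csv k) := by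
  induction csv using trim_data_by_top_segments_alt.induct with
  | case1 => rw [trim_data_by_top_segments_alt]; rfl
  | case2 row rest gid pending ih =>
    rw [trim_data_by_top_segments_alt]
    have hgroups : pvGroups (row :: rest) = pvKey row :: pvGroups ((row :: rest).filter (fun r => !(pvKey r == pvKey row))) := by
      unfold pvGroups
      rw [List.map_cons, pv_ofList_cons, List.filter_map]
      simp [Function.comp_def]
    rw [hgroups, List.flatMap_cons]
    congr 1
    · unfold pvEmit
      have : (max k 0).toNat = k.toNat := by omega
      rw [this]
    · rw [ih]
      apply List.flatMap_congr
      intro g hg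
      have hne : g ≠ pvKey row := by
        have := (PySem.Set.mem_ofList _ _).mp hg
        rcases List.mem_map.mp this with ⟨r, hr, hkey⟩
        have := List.of_mem_filter hr
        intro hcontra
        rw [← hkey] at hcontra
        simp [hcontra] at this
        exact this rfl
      exact pvEmit_filter (row :: rest) k (pvKey row) g hne


-- ===== VERDICT (by name: the statement is the Claim_ definition above) =====
theorem trim_data_by_top_segments_spec : Claim_equal_trim_data_by_top_segments := by
  intro csv k _ _
  unfold Spec_trim_data_by_top_segments
  rw [pvA_char, pvB_char]
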